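-- pv_equiv track=rewrite | github.com/anirbandasjgd/EDI-File-Generator | edi_generator.py | recount_se_and_fix
-- ===== SOURCE A (Python) =====
-- SEGMENT_TERMINATOR = "~"
--
-- ELEMENT_SEPARATOR = "*"
--
-- def recount_se_and_fix(edi: str) -> str:
--     """Fix SE segment count: count segments between ST and SE (inclusive)."""
--     parts = edi.split(SEGMENT_TERMINATOR)
--     st_idx = se_idx = None
--     for i, p in enumerate(parts):
--         if p.startswith("ST" + ELEMENT_SEPARATOR):
--             st_idx = i
--         if p.startswith("SE" + ELEMENT_SEPARATOR):
--             se_idx = i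
--             break
--     if st_idx is not None and se_idx is not None:
--         count = se_idx - st_idx + 1
--         se_parts = parts[se_idx].split(ELEMENT_SEPARATOR)
--         if len(se_parts) >= 2:
--             se_parts[1] = str(count)
--             parts[se_idx] = ELEMENT_SEPARATOR.join(se_parts)
--             return SEGMENT_TERMINATOR.join(parts)
--     return edi
-- ===== SOURCE B (Python) =====
-- SEGMENT_TERMINATOR = "~"
--
-- ELEMENT_SEPARATOR = "*"
--
-- def recount_se_and_fix(edi: str) -> str:
--     """Fix SE segment count: count segments between ST and SE (inclusive)."""
--     # Work on raw offsets: segment starts are offset 0 and every position after a "~".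
--     if edi.startswith("SE" + ELEMENT_SEPARATOR):
--         se_off = 0
--     else:
--         j = edi.find(SEGMENT_TERMINATOR + "SE" + ELEMENT_SEPARATOR)
--         if j == -1:
--             return edi
--         se_off = j + 1
--     k = edi.rfind(SEGMENT_TERMINATOR + "ST" + ELEMENT_SEPARATOR, 0, se_off)
--     if k != -1:
--         st_off = k + 1
--     elif edi.startswith("ST" + ELEMENT_SEPARATOR):
--         st_off = 0
--     else:
--         return edi
--     count = edi.count(SEGMENT_TERMINATOR, st_off, se_off) + 1
--     end = edi.find(SEGMENT_TERMINATOR, se_off)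
--     if end == -1:
--         end = len(edi)
--     fields = edi[se_off:end].split(ELEMENT_SEPARATOR)
--     fields[1] = str(count)
--     return edi[:se_off] + ELEMENT_SEPARATOR.join(fields) + edi[end:]
-- ===== Notes on version B (the rewrite author's own statement) =====
-- stated objective: alternative
-- what changed: B never builds the parts list: it works on raw string offsets, locating the start of the first SE segment with startswith/find, the last preceding ST segment start with a bounded rfind, counting segment terminators between the two offsets for the segment count, and splicing the rewritten SE segment back by string slicing; A splits the whole string into a list, scans it with an index loop, mutates the list and re-joins.
import Mathlib
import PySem

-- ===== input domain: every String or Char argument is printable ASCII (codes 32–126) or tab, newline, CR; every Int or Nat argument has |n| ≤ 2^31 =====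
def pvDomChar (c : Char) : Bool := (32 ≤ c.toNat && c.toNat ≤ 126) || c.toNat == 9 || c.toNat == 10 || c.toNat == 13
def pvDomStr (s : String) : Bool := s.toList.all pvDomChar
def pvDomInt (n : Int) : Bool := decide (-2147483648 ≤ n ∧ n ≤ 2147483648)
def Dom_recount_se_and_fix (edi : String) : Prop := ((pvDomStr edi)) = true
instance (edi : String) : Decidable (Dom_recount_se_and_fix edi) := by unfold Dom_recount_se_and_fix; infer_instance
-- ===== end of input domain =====

-- Header: B avoids building the parts list altogether — it finds the SE/ST segment
-- starts as raw string offsets (find/rfind), counts segment terminators between them and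
-- splices the rewritten SE segment back by slicing (objective: alternative).

-- ===== PORT A =====
-- A-side helper: the index-finding loop ('for i, p in enumerate(parts): …') of A.
def pvFindA : List (Int × List Char) → Option Int → Option Int × Option Int
  | [], st => (st, none)
  | (i, p) :: t, st =>
    let st1 := if PySem.Chars.startswith p ['S', 'T', '*'] then some i else st
    if PySem.Chars.startswith p ['S', 'E', '*'] then (st1, some i)
    else pvFindA t st1

-- A's code after the loop ('if st_idx is not None and se_idx is not None: …').
def pvPostA (edi : String) (parts : List (List Char)) : Option Int × Option Int → String
  | (some st, some se) =>
    let count := se - st + 1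
    let se_parts := PySem.Chars.splitOn (PySem.List.pyGetD parts se []) ['*']
    if 2 ≤ se_parts.length then
      let se_parts2 := se_parts.set 1 (PySem.Int.toChars count)
      let parts2 := parts.set se.toNat (PySem.Chars.join ['*'] se_parts2)
      String.ofList (PySem.Chars.join ['~'] parts2)
    else edi
  | _ => edi

def recount_se_and_fix (edi : String) : String :=
  let parts := PySem.Chars.splitOn edi.toList ['~']
  pvPostA edi parts (pvFindA (PySem.List.enumerate parts 0) none)

-- ===== PORT B =====
-- B works on raw offsets of edi: 'if edi.startswith("SE*"): se_off = 0 else: j = edi.find("~SE*") …'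
def recount_se_and_fix_alt (edi : String) : String :=
  let s := edi.toList
  let seOff? : Option Int :=
    if PySem.Chars.startswith s ['S', 'E', '*'] then some 0
    else
      let j := PySem.Chars.find s ['~', 'S', 'E', '*']
      if j = -1 then none else some (j + 1)
  match seOff? with
  | none => edi
  | some seOff =>
    -- 'k = edi.rfind("~ST*", 0, se_off)' and the two st_off branches
    let k := PySem.Chars.rfindFrom s ['~', 'S', 'T', '*'] 0 (some seOff)
    let stOff? : Option Int :=
      if k ≠ -1 then some (k + 1)
      else if PySem.Chars.startswith s ['S', 'T', '*'] then some 0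
      else none
    match stOff? with
    | none => edi
    | some stOff =>
      -- 'count = edi.count("~", st_off, se_off) + 1'
      let count : Int := (PySem.Chars.count (PySem.Chars.slice s (some stOff) (some seOff)) ['~'] : Int) + 1
      -- 'end = edi.find("~", se_off); if end == -1: end = len(edi)'
      let end0 := PySem.Chars.findFrom s ['~'] seOff none
      let endOff := if end0 = -1 then (s.length : Int) else end0
      -- 'fields = edi[se_off:end].split("*"); fields[1] = str(count)'
      let fields := PySem.Chars.splitOn (PySem.Chars.slice s (some seOff) (some endOff)) ['*']
      let fields2 := fields.set 1 (PySem.Int.toChars count)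
      -- 'return edi[:se_off] + "*".join(fields) + edi[end:]'
      String.ofList (PySem.Chars.slice s none (some seOff)
        ++ PySem.Chars.join ['*'] fields2
        ++ PySem.Chars.slice s (some endOff) none)

-- ===== PRECONDITION & SPEC =====
def Spec_recount_se_and_fix (edi : String) (out : String) : Prop := out = recount_se_and_fix_alt edi
instance (edi : String) (out : String) : Decidable (Spec_recount_se_and_fix edi out) := by unfold Spec_recount_se_and_fix; infer_instance

-- ===== CLAIM (what is proved, stated in full; the proofs are below) =====
def Claim_equal_recount_se_and_fix : Prop := ∀ (edi : String), Dom_recount_se_and_fix edi → Spec_recount_se_and_fix edi (recount_se_and_fix edi)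

-- ===== LEMMAS AND PROOFS =====

-- Reference single-character splitter (the shape of Python str.split on a 1-char sep).
def pvSplit (sep : Char) : List Char → List (List Char)
  | [] => [[]]
  | c :: r =>
    if c = sep then [] :: pvSplit sep r
    else match pvSplit sep r with
         | [] => [[c]]
         | h :: t => (c :: h) :: t

-- segment-start offset of the part following the part list `a` (0 if `a` is empty)
def pvOfs (a : List (List Char)) : Nat :=
  match a with
  | [] => 0
  | _ :: _ => (PySem.Chars.join ['~'] a).length + 1

-- offset of the first pat-prefixed part of the list (as a segment start inside its join)
def pvFirstOff (pat : List Char) : List (List Char) → Option Nat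
  | [] => none
  | p :: t => if pat.isPrefixOf p then some 0 else (pvFirstOff pat t).map (fun o => p.length + 1 + o)

-- offset of the last pat-prefixed part of the list
def pvLastOff (pat : List Char) : List (List Char) → Option Nat
  | [] => none
  | p :: t =>
    match pvLastOff pat t with
    | some o => some (p.length + 1 + o)
    | none => if pat.isPrefixOf p then some 0 else none

-- the rewritten SE segment, shared by both renderings
def pvNewSeg (p : List Char) (c : Int) : List Char :=
  PySem.Chars.join ['*'] ((PySem.Chars.splitOn p ['*']).set 1 (PySem.Int.toChars c))

lemma pvSplit_ne_nil (sep : Char) (s : List Char) : pvSplit sep s ≠ [] := by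
  induction s with
  | nil => simp [pvSplit]
  | cons c r ih =>
    by_cases h : c = sep
    · simp [pvSplit, h]
    · cases hq : pvSplit sep r with
      | nil => simp [pvSplit, h, hq]
      | cons a t => simp [pvSplit, h, hq]

lemma pv_go_eq (sep : Char) : ∀ (fuel : Nat) (l cur : List Char) (acc : List (List Char)),
    l.length ≤ fuel →
    PySem.Chars.splitOn.go [sep] fuel l cur acc
      = acc.reverse ++ (match pvSplit sep l with
          | [] => [cur.reverse]
          | h :: t => (cur.reverse ++ h) :: t) := by
  intro fuel
  induction fuel with
  | zero =>
    intro l cur acc hl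
    have : l = [] := by cases l <;> simp_all
    subst this
    simp [PySem.Chars.splitOn.go, pvSplit]
  | succ f ih =>
    intro l cur acc hl
    cases l with
    | nil => simp [PySem.Chars.splitOn.go, pvSplit]
    | cons c rest =>
      by_cases hc : c = sep
      · subst hc
        have hp : [c].isPrefixOf (c :: rest) = true := by simp [List.isPrefixOf]
        rw [show PySem.Chars.splitOn.go [c] (f + 1) (c :: rest) cur acc
              = PySem.Chars.splitOn.go [c] f (List.drop [c].length (c :: rest)) [] (cur.reverse :: acc) by
            simp [PySem.Chars.splitOn.go, hp]]
        rw [ih _ _ _ (by simpa using Nat.le_of_succ_le_succ hl)]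
        cases hq : pvSplit c rest with
        | nil => exact absurd hq (pvSplit_ne_nil c rest)
        | cons h t => simp [pvSplit, hq]
      · have hp : ¬ ([sep].isPrefixOf (c :: rest) = true) := by
          simp [List.isPrefixOf]
          intro h; exact hc h.symm
        rw [show PySem.Chars.splitOn.go [sep] (f + 1) (c :: rest) cur acc
              = PySem.Chars.splitOn.go [sep] f rest (c :: cur) acc by
            simp [PySem.Chars.splitOn.go, hp]]
        rw [ih _ _ _ (by simpa using Nat.le_of_succ_le_succ hl)]
        cases hq : pvSplit sep rest with
        | nil => exact absurd hq (pvSplit_ne_nil sep rest)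
        | cons h t => simp [pvSplit, hc, hq]

lemma pv_splitOn_eq (sep : Char) (s : List Char) :
    PySem.Chars.splitOn s [sep] = pvSplit sep s := by
  show PySem.Chars.splitOn.go [sep] (s.length + 1) s [] [] = pvSplit sep s
  rw [pv_go_eq sep (s.length + 1) s [] [] (by omega)]
  cases hq : pvSplit sep s with
  | nil => exact absurd hq (pvSplit_ne_nil sep s)
  | cons h t => simp

lemma pv_join_cons (sep : Char) (p : List Char) (ps : List (List Char)) (h : ps ≠ []) :
    PySem.Chars.join [sep] (p :: ps) = p ++ sep :: PySem.Chars.join [sep] ps := by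
  cases ps with
  | nil => simp at h
  | cons q t =>
    show List.intercalate [sep] (p :: q :: t) = p ++ sep :: List.intercalate [sep] (q :: t)
    simp [List.intercalate, List.intersperse]

lemma pv_join_split (sep : Char) (s : List Char) :
    PySem.Chars.join [sep] (pvSplit sep s) = s := by
  induction s with
  | nil => simp [pvSplit, PySem.Chars.join, List.intercalate]
  | cons c r ih =>
    by_cases hc : c = sep
    · subst hc
      rw [show pvSplit c (c :: r) = [] :: pvSplit c r by simp [pvSplit],
        pv_join_cons c [] _ (pvSplit_ne_nil c r)]
      simpa using ih
    · cases hq : pvSplit sep r with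
      | nil => exact absurd hq (pvSplit_ne_nil sep r)
      | cons h t =>
        rw [show pvSplit sep (c :: r) = (c :: h) :: t by simp [pvSplit, hc, hq]]
        cases t with
        | nil =>
          rw [hq] at ih
          simpa [PySem.Chars.join, List.intercalate] using ih
        | cons u v =>
          rw [hq, pv_join_cons sep h (u :: v) (by simp)] at ih
          rw [pv_join_cons sep (c :: h) (u :: v) (by simp)]
          simpa using ih

lemma pv_free {sep : Char} {s p : List Char} (h : p ∈ pvSplit sep s) : sep ∉ p := by
  induction s generalizing p with
  | nil => simp [pvSplit] at h; simp [h]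
  | cons c r ih =>
    by_cases hc : c = sep
    · subst hc
      rw [show pvSplit c (c :: r) = [] :: pvSplit c r by simp [pvSplit]] at h
      rcases List.mem_cons.mp h with h | h
      · simp [h]
      · exact ih h
    · cases hq : pvSplit sep r with
      | nil => exact absurd hq (pvSplit_ne_nil sep r)
      | cons hd t =>
        rw [show pvSplit sep (c :: r) = (c :: hd) :: t by simp [pvSplit, hc, hq]] at h
        rcases List.mem_cons.mp h with h | h
        · subst h
          intro hm
          rcases List.mem_cons.mp hm with hm | hm
          · exact hc hm.symm
          · exact ih (by simp [hq]) hm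
        · exact ih (by simp [hq, h])


lemma pv_join_append (sep : Char) (ps qs : List (List Char)) (h1 : ps ≠ []) (h2 : qs ≠ []) :
    PySem.Chars.join [sep] (ps ++ qs)
      = PySem.Chars.join [sep] ps ++ sep :: PySem.Chars.join [sep] qs := by
  induction ps with
  | nil => simp at h1
  | cons p t ih =>
    cases t with
    | nil =>
      rw [show ([p] : List (List Char)) ++ qs = p :: qs by simp, pv_join_cons sep p qs h2]
      simp [PySem.Chars.join, List.intercalate]
    | cons u v =>
      rw [show (p :: u :: v) ++ qs = p :: ((u :: v) ++ qs) by simp,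
        pv_join_cons sep p ((u :: v) ++ qs) (by simp),
        pv_join_cons sep p (u :: v) (by simp), ih (by simp)]
      simp

lemma pv_prefix_append_sep {sep : Char} {pat p : List Char} (r : List Char)
    (hpat : sep ∉ pat) (hp : sep ∉ p) :
    pat.isPrefixOf (p ++ sep :: r) = pat.isPrefixOf p := by
  induction pat generalizing p with
  | nil => simp [List.isPrefixOf]
  | cons a pt ih =>
    cases p with
    | nil =>
      simp only [List.nil_append]
      have ha : a ≠ sep := by intro h; exact hpat (by simp [h])
      simp [List.isPrefixOf, ha]
    | cons b pb =>
      simp only [List.cons_append, List.isPrefixOf]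
      rw [ih (by intro h; exact hpat (by simp [h])) (by intro h; exact hp (by simp [h]))]

lemma pv_prefix_join {sep : Char} {pat p : List Char} (t : List (List Char))
    (hpat : sep ∉ pat) (hp : sep ∉ p) :
    pat.isPrefixOf (PySem.Chars.join [sep] (p :: t)) = pat.isPrefixOf p := by
  cases t with
  | nil => simp [PySem.Chars.join, List.intercalate]
  | cons u v =>
    rw [pv_join_cons sep p (u :: v) (by simp)]
    exact pv_prefix_append_sep _ hpat hp

lemma pv_find_go_shift {sub : List Char} (h : sub ≠ []) : ∀ (l : List Char) (k : Nat),
    PySem.Chars.find.go sub l k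
      = if PySem.Chars.find.go sub l 0 = -1 then -1 else (k : Int) + PySem.Chars.find.go sub l 0 := by
  intro l
  induction l with
  | nil =>
    intro k
    simp [PySem.Chars.find.go.eq_1, List.isEmpty_eq_false_iff.mpr h]
  | cons c t ih =>
    intro k
    by_cases hp : sub.isPrefixOf (c :: t) = true
    · simp [PySem.Chars.find.go.eq_2, hp]
    · rw [PySem.Chars.find.go.eq_2, if_neg hp, PySem.Chars.find.go.eq_2, if_neg hp,
        ih (k + 1), ih 1]
      by_cases hz : PySem.Chars.find.go sub t 0 = -1
      · simp [hz]
      · rw [if_neg hz, if_neg hz]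
        have h1 : (1 : Int) + PySem.Chars.find.go sub t 0 ≠ -1 := by
          have := PySem.Chars.neg_one_le_find (s := t) (sub := sub)
          unfold PySem.Chars.find at this
          omega
        push_cast
        rw [if_neg h1]
        ring

lemma pv_find_nil {sub : List Char} (h : sub ≠ []) : PySem.Chars.find [] sub = -1 := by
  unfold PySem.Chars.find
  simp [PySem.Chars.find.go.eq_1, List.isEmpty_eq_false_iff.mpr h]

lemma pv_find_cons {sub : List Char} (h : sub ≠ []) (c : Char) (t : List Char) :
    PySem.Chars.find (c :: t) sub
      = if sub.isPrefixOf (c :: t) then 0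
        else if PySem.Chars.find t sub = -1 then -1 else 1 + PySem.Chars.find t sub := by
  unfold PySem.Chars.find
  rw [PySem.Chars.find.go.eq_2]
  by_cases hp : sub.isPrefixOf (c :: t) = true
  · simp [hp]
  · rw [if_neg hp, if_neg hp, pv_find_go_shift h t 1]
    by_cases hz : PySem.Chars.find.go sub t 0 = -1 <;> simp [hz]

lemma pv_find_free {sep : Char} {q : List Char} (pat : List Char) (hq : sep ∉ q) :
    PySem.Chars.find q (sep :: pat) = -1 := by
  induction q with
  | nil => exact pv_find_nil (by simp)
  | cons c t ih =>
    rw [pv_find_cons (by simp) c t]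
    have hc : c ≠ sep := by intro h; exact hq (by simp [h])
    have hp : ¬ ((sep :: pat).isPrefixOf (c :: t) = true) := by
      simp [List.isPrefixOf]
      intro h; exact absurd h.symm hc
    rw [if_neg hp, ih (by intro h; exact hq (by simp [h]))]
    simp

lemma pv_find_append {sep : Char} {q : List Char} (pat r : List Char) (hq : sep ∉ q) :
    PySem.Chars.find (q ++ sep :: r) (sep :: pat)
      = if pat.isPrefixOf r then (q.length : Int)
        else if PySem.Chars.find r (sep :: pat) = -1 then -1
        else (q.length : Int) + 1 + PySem.Chars.find r (sep :: pat) := by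
  have hge := PySem.Chars.neg_one_le_find (s := r) (sub := sep :: pat)
  induction q with
  | nil =>
    simp only [List.nil_append, List.length_nil, Nat.cast_zero]
    rw [pv_find_cons (by simp) sep r]
    have hpp : (sep :: pat).isPrefixOf (sep :: r) = pat.isPrefixOf r := by
      simp [List.isPrefixOf]
    rw [hpp]
    split_ifs <;> omega
  | cons c t ih =>
    have hc : c ≠ sep := by intro h; exact hq (by simp [h])
    have ht : sep ∉ t := by intro h; exact hq (by simp [h])
    rw [List.cons_append, pv_find_cons (by simp) c (t ++ sep :: r)]
    have hp : ¬ ((sep :: pat).isPrefixOf (c :: (t ++ sep :: r)) = true) := by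
      simp [List.isPrefixOf]
      intro h; exact absurd h.symm hc
    rw [if_neg hp, ih ht]
    have hlen : ((c :: t).length : Int) = (t.length : Int) + 1 := by push_cast [List.length_cons]; ring
    rw [hlen]
    split_ifs <;> first | omega | simp_all

lemma pv_find_single {sep : Char} {q : List Char} (r : List Char) (hq : sep ∉ q) :
    PySem.Chars.find (q ++ sep :: r) [sep] = (q.length : Int) := by
  induction q with
  | nil =>
    simp only [List.nil_append, List.length_nil, Nat.cast_zero]
    rw [pv_find_cons (by simp) sep r]
    simp [List.isPrefixOf]
  | cons c t ih =>
    have hc : c ≠ sep := by intro h; exact hq (by simp [h])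
    rw [List.cons_append, pv_find_cons (by simp) c (t ++ sep :: r)]
    have hp : ¬ (([sep] : List Char).isPrefixOf (c :: (t ++ sep :: r)) = true) := by
      simp [List.isPrefixOf]
      intro h; exact absurd h.symm hc
    rw [if_neg hp, ih (by intro h; exact hq (by simp [h]))]
    rw [if_neg (by omega : ¬ ((t.length : Int) = -1))]
    push_cast [List.length_cons]
    ring

lemma pv_find_marker {sep : Char} {pat : List Char} (hpat : sep ∉ pat) :
    ∀ (t : List (List Char)) (q : List Char), sep ∉ q → (∀ x ∈ t, sep ∉ x) →
    PySem.Chars.find (PySem.Chars.join [sep] (q :: t)) (sep :: pat)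
      = match pvFirstOff pat t with
        | none => -1
        | some o => ((q.length + o : Nat) : Int) := by
  intro t
  induction t with
  | nil =>
    intro q hq _
    rw [show PySem.Chars.join [sep] [q] = q by simp [PySem.Chars.join, List.intercalate]]
    simp [pvFirstOff, pv_find_free pat hq]
  | cons h t' ih =>
    intro q hq hall
    have hh : sep ∉ h := hall h (by simp)
    rw [pv_join_cons sep q (h :: t') (by simp), pv_find_append pat _ hq,
      pv_prefix_join t' hpat hh]
    by_cases hph : pat.isPrefixOf h = true
    · simp [pvFirstOff, hph]
    · rw [if_neg hph, ih h hh (by intro x hx; exact hall x (by simp [hx]))]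
      cases hfo : pvFirstOff pat t' with
      | none => simp [pvFirstOff, hph, hfo]
      | some o =>
        rw [if_neg (by omega : ¬ (((h.length + o : Nat) : Int) = -1))]
        simp only [pvFirstOff, hph, hfo, Option.map_some]
        push_cast
        ring

lemma pv_rfind_go_zero (s sub : List Char) :
    PySem.Chars.rfind.go s sub 0 = if sub.isPrefixOf s then 0 else -1 := by
  rfl

lemma pv_rfind_go_succ (s sub : List Char) (j : Nat) :
    PySem.Chars.rfind.go s sub (j + 1)
      = if sub.isPrefixOf (s.drop (j + 1)) then ((j + 1 : Nat) : Int) else PySem.Chars.rfind.go s sub j := by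
  rfl

lemma pv_rfind_go_cons (c : Char) (u sub : List Char) : ∀ (j : Nat),
    PySem.Chars.rfind.go (c :: u) sub (j + 1)
      = if PySem.Chars.rfind.go u sub j = -1 then (if sub.isPrefixOf (c :: u) then 0 else -1)
        else 1 + PySem.Chars.rfind.go u sub j := by
  intro j
  induction j with
  | zero =>
    rw [pv_rfind_go_succ, pv_rfind_go_zero, pv_rfind_go_zero]
    simp only [List.drop_succ_cons, List.drop_zero]
    by_cases hp : sub.isPrefixOf u = true
    · simp [hp]
    · simp [hp]
  | succ j ih =>
    rw [pv_rfind_go_succ (c :: u) sub (j + 1), pv_rfind_go_succ u sub j]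
    simp only [List.drop_succ_cons]
    by_cases hp : sub.isPrefixOf (u.drop (j + 1)) = true
    · rw [if_pos hp, if_pos hp]
      rw [if_neg (by omega : ¬ (((j + 1 : Nat) : Int) = -1))]
      push_cast
      ring
    · rw [if_neg hp, if_neg hp, ih]

lemma pv_rfind_nil {sub : List Char} (h : sub ≠ []) : PySem.Chars.rfind [] sub = -1 := by
  show PySem.Chars.rfind.go [] sub 0 = -1
  rw [pv_rfind_go_zero]
  cases sub with
  | nil => simp at h
  | cons a t => simp [List.isPrefixOf]

lemma pv_rfind_cons (c : Char) (u sub : List Char) :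
    PySem.Chars.rfind (c :: u) sub
      = if PySem.Chars.rfind u sub = -1 then (if sub.isPrefixOf (c :: u) then 0 else -1)
        else 1 + PySem.Chars.rfind u sub := by
  show PySem.Chars.rfind.go (c :: u) sub (u.length + 1)
      = if PySem.Chars.rfind.go u sub u.length = -1 then (if sub.isPrefixOf (c :: u) then 0 else -1)
        else 1 + PySem.Chars.rfind.go u sub u.length
  exact pv_rfind_go_cons c u sub u.length

lemma pv_rfind_go_ge (s sub : List Char) : ∀ (j : Nat), -1 ≤ PySem.Chars.rfind.go s sub j := by
  intro j
  induction j with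
  | zero => rw [pv_rfind_go_zero]; split_ifs <;> omega
  | succ j ih =>
    rw [pv_rfind_go_succ]
    split_ifs <;> [omega; exact ih]

lemma pv_rfind_ge (s sub : List Char) : -1 ≤ PySem.Chars.rfind s sub :=
  pv_rfind_go_ge s sub s.length

lemma pv_rfind_append {sep : Char} {q : List Char} (pat r : List Char) (hq : sep ∉ q) :
    PySem.Chars.rfind (q ++ sep :: r) (sep :: pat)
      = if PySem.Chars.rfind r (sep :: pat) = -1 then
          (if pat.isPrefixOf r then (q.length : Int) else -1)
        else (q.length : Int) + 1 + PySem.Chars.rfind r (sep :: pat) := by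
  have hge : -1 ≤ PySem.Chars.rfind r (sep :: pat) := pv_rfind_ge r (sep :: pat)
  induction q with
  | nil =>
    simp only [List.nil_append, List.length_nil, Nat.cast_zero]
    rw [pv_rfind_cons sep r (sep :: pat)]
    have hpp : (sep :: pat).isPrefixOf (sep :: r) = pat.isPrefixOf r := by
      simp [List.isPrefixOf]
    rw [hpp]
    split_ifs <;> omega
  | cons c t ih =>
    have hc : c ≠ sep := by intro h; exact hq (by simp [h])
    have ht : sep ∉ t := by intro h; exact hq (by simp [h])
    rw [List.cons_append, pv_rfind_cons c (t ++ sep :: r) (sep :: pat)]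
    have hp : ¬ ((sep :: pat).isPrefixOf (c :: (t ++ sep :: r)) = true) := by
      simp [List.isPrefixOf]
      intro h; exact absurd h.symm hc
    rw [if_neg hp, ih ht]
    have hlen : ((c :: t).length : Int) = (t.length : Int) + 1 := by push_cast [List.length_cons]; ring
    rw [hlen]
    split_ifs <;> first | omega | simp_all

lemma pv_rfind_marker {sep : Char} {pat : List Char} (hpat : sep ∉ pat) (hne : pat ≠ []) :
    ∀ (t : List (List Char)) (q : List Char), sep ∉ q → (∀ x ∈ t, sep ∉ x) →
    PySem.Chars.rfind (PySem.Chars.join [sep] (q :: t) ++ [sep]) (sep :: pat)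
      = match pvLastOff pat t with
        | none => -1
        | some o => ((q.length + o : Nat) : Int) := by
  intro t
  induction t with
  | nil =>
    intro q hq _
    rw [show PySem.Chars.join [sep] [q] ++ [sep] = q ++ sep :: [] by
        simp [PySem.Chars.join, List.intercalate]]
    rw [pv_rfind_append pat [] hq, pv_rfind_nil (by simp)]
    simp [pvLastOff, List.isPrefixOf_iff_prefix, List.prefix_nil, hne]
  | cons h t' ih =>
    intro q hq hall
    have hh : sep ∉ h := hall h (by simp)
    rw [pv_join_cons sep q (h :: t') (by simp), List.append_assoc, List.cons_append]
    rw [pv_rfind_append pat _ hq, ih h hh (by intro x hx; exact hall x (by simp [hx]))]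
    have hpp : pat.isPrefixOf (PySem.Chars.join [sep] (h :: t') ++ [sep]) = pat.isPrefixOf h := by
      cases t' with
      | nil =>
        rw [show PySem.Chars.join [sep] [h] ++ [sep] = h ++ sep :: [] by
            simp [PySem.Chars.join, List.intercalate]]
        exact pv_prefix_append_sep [] hpat hh
      | cons u v =>
        rw [pv_join_cons sep h (u :: v) (by simp), List.append_assoc, List.cons_append]
        exact pv_prefix_append_sep _ hpat hh
    rw [hpp]
    cases hlo : pvLastOff pat t' with
    | none =>
      by_cases hph : pat.isPrefixOf h = true
      · simp [pvLastOff, hlo, hph]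
      · simp [pvLastOff, hlo, hph]
    | some o =>
      rw [if_neg (by omega : ¬ (((h.length + o : Nat) : Int) = -1))]
      simp only [pvLastOff, hlo]
      push_cast
      ring

lemma pv_count_go (a : Char) : ∀ (fuel : Nat) (l : List Char) (acc : Nat),
    l.length ≤ fuel → PySem.Chars.count.go [a] fuel l acc = acc + l.count a := by
  intro fuel
  induction fuel with
  | zero =>
    intro l acc hl
    have : l = [] := by cases l <;> simp_all
    subst this
    simp [PySem.Chars.count.go]
  | succ f ih =>
    intro l acc hl
    cases l with
    | nil => simp [PySem.Chars.count.go]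
    | cons c t =>
      by_cases hc : a = c
      · subst hc
        have hp : ([a] : List Char).isPrefixOf (a :: t) = true := by simp [List.isPrefixOf]
        rw [show PySem.Chars.count.go [a] (f + 1) (a :: t) acc
              = PySem.Chars.count.go [a] f (List.drop ([a] : List Char).length (a :: t)) (acc + 1) by
            simp [PySem.Chars.count.go, hp]]
        rw [show List.drop ([a] : List Char).length (a :: t) = t by simp]
        rw [ih t (acc + 1) (by simpa using Nat.le_of_succ_le_succ hl)]
        simp
        omega
      · have hp : ¬ (([a] : List Char).isPrefixOf (c :: t) = true) := by
          simp [List.isPrefixOf, hc]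
        rw [show PySem.Chars.count.go [a] (f + 1) (c :: t) acc
              = PySem.Chars.count.go [a] f t acc by
            simp [PySem.Chars.count.go, hp]]
        rw [ih t acc (by simpa using Nat.le_of_succ_le_succ hl)]
        have : c ≠ a := fun h => hc h.symm
        simp [this]

lemma pv_count_single (l : List Char) (a : Char) : PySem.Chars.count l [a] = l.count a := by
  show (if ([a] : List Char).isEmpty = true then l.length + 1 else PySem.Chars.count.go [a] l.length l 0) = l.count a
  rw [if_neg (by simp)]
  simpa using pv_count_go a l.length l 0 (le_refl _)

lemma pv_count_join {sep : Char} : ∀ (mid : List (List Char)), mid ≠ [] → (∀ x ∈ mid, sep ∉ x) →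
    (PySem.Chars.join [sep] mid ++ [sep]).count sep = mid.length := by
  intro mid
  induction mid with
  | nil => simp
  | cons m rest ih =>
    intro _ hfree
    have hm : sep ∉ m := hfree m (by simp)
    have hcm : m.count sep = 0 := List.count_eq_zero.mpr hm
    cases rest with
    | nil =>
      rw [show PySem.Chars.join [sep] [m] = m by simp [PySem.Chars.join, List.intercalate]]
      simp [List.count_append, hcm]
    | cons u v =>
      rw [pv_join_cons sep m (u :: v) (by simp), List.append_assoc, List.cons_append]
      have h2 := ih (by simp) (by intro x hx; exact hfree x (by simp [hx]))
      simp [List.count_append, hcm, h2]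

lemma pv_firstOff_none {pat : List Char} : ∀ (l : List (List Char)),
    (∀ x ∈ l, ¬ pat.isPrefixOf x) → pvFirstOff pat l = none := by
  intro l
  induction l with
  | nil => simp [pvFirstOff]
  | cons p t ih =>
    intro h
    have hp : ¬ pat.isPrefixOf p = true := h p (by simp)
    simp [pvFirstOff, hp, ih (by intro x hx; exact h x (by simp [hx]))]

lemma pv_lastOff_none {pat : List Char} : ∀ (l : List (List Char)),
    (∀ x ∈ l, ¬ pat.isPrefixOf x) → pvLastOff pat l = none := by
  intro l
  induction l with
  | nil => simp [pvLastOff]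
  | cons p t ih =>
    intro h
    have hp : ¬ pat.isPrefixOf p = true := h p (by simp)
    simp [pvLastOff, hp, ih (by intro x hx; exact h x (by simp [hx]))]

lemma pv_ofs_cons (q : List Char) (a : List (List Char)) :
    pvOfs (q :: a) = q.length + 1 + pvOfs a := by
  cases a with
  | nil => simp [pvOfs, PySem.Chars.join, List.intercalate]
  | cons u v =>
    show (PySem.Chars.join ['~'] (q :: u :: v)).length + 1
        = q.length + 1 + ((PySem.Chars.join ['~'] (u :: v)).length + 1)
    rw [pv_join_cons '~' q (u :: v) (by simp)]
    simp
    omega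

lemma pv_firstOff_decomp {pat : List Char} : ∀ (t' : List (List Char)) (p : List Char) (suf : List (List Char)),
    (∀ x ∈ t', ¬ pat.isPrefixOf x) → pat.isPrefixOf p →
    pvFirstOff pat (t' ++ p :: suf) = some (pvOfs t') := by
  intro t'
  induction t' with
  | nil =>
    intro p suf _ hp
    simp [pvFirstOff, hp, pvOfs]
  | cons q t ih =>
    intro p suf hfree hp
    have hq : ¬ pat.isPrefixOf q = true := hfree q (by simp)
    rw [List.cons_append]
    simp only [pvFirstOff, hq, Bool.false_eq_true, if_false,
      ih p suf (by intro x hx; exact hfree x (by simp [hx])) hp, Option.map_some]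
    rw [pv_ofs_cons]

lemma pv_lastOff_decomp {pat : List Char} : ∀ (a : List (List Char)) (stp : List Char) (b : List (List Char)),
    pat.isPrefixOf stp → (∀ x ∈ b, ¬ pat.isPrefixOf x) →
    pvLastOff pat (a ++ stp :: b) = some (pvOfs a) := by
  intro a
  induction a with
  | nil =>
    intro stp b hstp hb
    simp [pvLastOff, pv_lastOff_none b hb, hstp, pvOfs]
  | cons q t ih =>
    intro stp b hstp hb
    rw [List.cons_append]
    simp only [pvLastOff, ih stp b hstp hb]
    rw [pv_ofs_cons]

lemma pv_drop_join : ∀ (pre rest : List (List Char)), rest ≠ [] →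
    (PySem.Chars.join ['~'] (pre ++ rest)).drop (pvOfs pre) = PySem.Chars.join ['~'] rest := by
  intro pre rest hne
  cases pre with
  | nil => simp [pvOfs]
  | cons q t =>
    rw [pv_join_append '~' (q :: t) rest (by simp) hne]
    show (PySem.Chars.join ['~'] (q :: t) ++ '~' :: PySem.Chars.join ['~'] rest).drop
        ((PySem.Chars.join ['~'] (q :: t)).length + 1) = _
    rw [show (PySem.Chars.join ['~'] (q :: t)).length + 1
          = (PySem.Chars.join ['~'] (q :: t) ++ ['~']).length by simp]
    rw [show PySem.Chars.join ['~'] (q :: t) ++ '~' :: PySem.Chars.join ['~'] rest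
          = (PySem.Chars.join ['~'] (q :: t) ++ ['~']) ++ PySem.Chars.join ['~'] rest by simp]
    exact List.drop_left

lemma pv_not_ST_of_SE {p : List Char} (h : List.isPrefixOf ['S', 'E', '*'] p = true) :
    List.isPrefixOf ['S', 'T', '*'] p = false := by
  cases p with
  | nil => simp [List.isPrefixOf] at h
  | cons c1 r1 =>
    cases r1 with
    | nil => simp [List.isPrefixOf] at h
    | cons c2 r2 =>
      simp [List.isPrefixOf] at h ⊢
      intro _ h2
      rw [← h.2.1] at h2
      exact absurd h2 (by decide)

lemma pv_splitOn_SEstar (q : List Char) :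
    PySem.Chars.splitOn ('S' :: 'E' :: '*' :: q) ['*'] = ['S', 'E'] :: PySem.Chars.splitOn q ['*'] := by
  rw [pv_splitOn_eq, pv_splitOn_eq]
  cases hq : pvSplit '*' q with
  | nil => exact absurd hq (pvSplit_ne_nil '*' q)
  | cons h t =>
    simp [pvSplit, hq]


lemma pv_ofs_append : ∀ (a mid : List (List Char)), pvOfs (a ++ mid) = pvOfs a + pvOfs mid := by
  intro a
  induction a with
  | nil => intro mid; simp [pvOfs]
  | cons q t ih =>
    intro mid
    rw [List.cons_append, pv_ofs_cons, pv_ofs_cons, ih]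
    omega

lemma pv_len_join (pre rest : List (List Char)) (h : rest ≠ []) :
    (PySem.Chars.join ['~'] (pre ++ rest)).length = pvOfs pre + (PySem.Chars.join ['~'] rest).length := by
  cases pre with
  | nil => simp [pvOfs]
  | cons q t =>
    rw [pv_join_append '~' (q :: t) rest (by simp) h]
    show (PySem.Chars.join ['~'] (q :: t) ++ '~' :: PySem.Chars.join ['~'] rest).length
        = (PySem.Chars.join ['~'] (q :: t)).length + 1 + (PySem.Chars.join ['~'] rest).length
    simp
    omega

lemma pv_take_join (mid rest : List (List Char)) (hm : mid ≠ []) (hr : rest ≠ []) :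
    (PySem.Chars.join ['~'] (mid ++ rest)).take (pvOfs mid)
      = PySem.Chars.join ['~'] mid ++ ['~'] := by
  rw [pv_join_append '~' mid rest hm hr]
  cases mid with
  | nil => simp at hm
  | cons q t =>
    show (PySem.Chars.join ['~'] (q :: t) ++ '~' :: PySem.Chars.join ['~'] rest).take
        ((PySem.Chars.join ['~'] (q :: t)).length + 1) = _
    rw [List.take_append]
    simp

-- extract the "SE*q" shape from the prefix test
lemma pv_SE_shape {p : List Char} (h : List.isPrefixOf ['S', 'E', '*'] p = true) :
    ∃ q, p = 'S' :: 'E' :: '*' :: q := by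
  rw [List.isPrefixOf_iff_prefix] at h
  obtain ⟨q, hq⟩ := h
  exact ⟨q, hq.symm⟩

-- ----- B-side terminal evaluations -----

lemma pv_rfindFrom_eval (s sub : List Char) (N : Nat) (hN : N ≤ s.length) :
    PySem.Chars.rfindFrom s sub 0 (some (N : Int))
      = if PySem.Chars.rfind (s.take N) sub = -1 then -1
        else PySem.Chars.rfind (s.take N) sub := by
  unfold PySem.Chars.rfindFrom
  have h1 : ¬ ((s.length : Int) < (N : Int)) := by omega
  have h2 : ¬ ((N : Int) < 0) := by omega
  simp [h1, h2]


lemma pv_B_noSE {edi : String} {ps : List (List Char)}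
    (hs : edi.toList = PySem.Chars.join ['~'] ps) (hne : ps ≠ [])
    (hfree : ∀ x ∈ ps, '~' ∉ x)
    (hnoSE : ∀ x ∈ ps, ¬ List.isPrefixOf ['S', 'E', '*'] x) :
    recount_se_and_fix_alt edi = edi := by
  cases ps with
  | nil => exact absurd rfl hne
  | cons q t =>
    have hq : '~' ∉ q := hfree q (by simp)
    have hsw : PySem.Chars.startswith edi.toList ['S', 'E', '*'] = false := by
      show List.isPrefixOf ['S', 'E', '*'] edi.toList = false
      rw [hs, pv_prefix_join t (by decide) hq]
      exact eq_false_of_ne_true (hnoSE q (by simp))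
    have hfind : PySem.Chars.find edi.toList ['~', 'S', 'E', '*'] = -1 := by
      rw [hs,
        show (['~', 'S', 'E', '*'] : List Char) = '~' :: ['S', 'E', '*'] from rfl,
        pv_find_marker (by decide) t q hq (fun x hx => hfree x (by simp [hx])),
        pv_firstOff_none t (fun x hx => hnoSE x (by simp [hx]))]
    unfold recount_se_and_fix_alt
    simp [hsw, hfind]

lemma pv_B_SE_noST {edi : String} {pre : List (List Char)} {p : List Char} {suf : List (List Char)}
    (hs : edi.toList = PySem.Chars.join ['~'] (pre ++ p :: suf))
    (hfree : ∀ x ∈ pre ++ p :: suf, '~' ∉ x)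
    (hpre : ∀ x ∈ pre, ¬ List.isPrefixOf ['S', 'E', '*'] x)
    (hp : List.isPrefixOf ['S', 'E', '*'] p = true)
    (hnoST : ∀ x ∈ pre, ¬ List.isPrefixOf ['S', 'T', '*'] x) :
    recount_se_and_fix_alt edi = edi := by
  have hp' : '~' ∉ p := hfree p (by simp)
  cases pre with
  | nil =>
    simp only [List.nil_append] at hs
    have hsw : PySem.Chars.startswith edi.toList ['S', 'E', '*'] = true := by
      show List.isPrefixOf ['S', 'E', '*'] edi.toList = true
      rw [hs, pv_prefix_join suf (by decide) hp']
      exact hp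
    have hswST : PySem.Chars.startswith edi.toList ['S', 'T', '*'] = false := by
      show List.isPrefixOf ['S', 'T', '*'] edi.toList = false
      rw [hs, pv_prefix_join suf (by decide) hp']
      exact pv_not_ST_of_SE hp
    have hk : PySem.Chars.rfindFrom edi.toList ['~', 'S', 'T', '*'] 0 (some 0) = -1 := by
      rw [show (some (0 : Int)) = some ((0 : Nat) : Int) by norm_num,
        pv_rfindFrom_eval _ _ 0 (by omega)]
      simp [pv_rfind_nil (show (['~', 'S', 'T', '*'] : List Char) ≠ [] by simp)]
    unfold recount_se_and_fix_alt
    simp [hsw, hk, hswST]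
  | cons q t =>
    have hq : '~' ∉ q := hfree q (by simp)
    rw [show (q :: t) ++ p :: suf = q :: (t ++ p :: suf) from rfl] at hs
    have htail : ∀ x ∈ t ++ p :: suf, '~' ∉ x := by
      intro x hx; exact hfree x (by simpa using Or.inr hx)
    have hsw : PySem.Chars.startswith edi.toList ['S', 'E', '*'] = false := by
      show List.isPrefixOf ['S', 'E', '*'] edi.toList = false
      rw [hs, pv_prefix_join _ (by decide) hq]
      exact eq_false_of_ne_true (hpre q (by simp))
    have hfo : pvFirstOff ['S', 'E', '*'] (t ++ p :: suf) = some (pvOfs t) :=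
      pv_firstOff_decomp t p suf (fun x hx => hpre x (by simp [hx])) hp
    have hfind : PySem.Chars.find edi.toList ['~', 'S', 'E', '*'] = ((q.length + pvOfs t : Nat) : Int) := by
      rw [hs, show (['~', 'S', 'E', '*'] : List Char) = '~' :: ['S', 'E', '*'] from rfl,
        pv_find_marker (by decide) _ q hq htail, hfo]
    have hlen : edi.toList.length = pvOfs (q :: t) + (PySem.Chars.join ['~'] (p :: suf)).length := by
      rw [hs, show q :: (t ++ p :: suf) = (q :: t) ++ p :: suf from rfl]
      exact pv_len_join (q :: t) (p :: suf) (by simp)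
    have hNle : pvOfs (q :: t) ≤ edi.toList.length := by omega
    have htake : edi.toList.take (pvOfs (q :: t)) = PySem.Chars.join ['~'] (q :: t) ++ ['~'] := by
      rw [hs, show q :: (t ++ p :: suf) = (q :: t) ++ p :: suf from rfl]
      exact pv_take_join (q :: t) (p :: suf) (by simp) (by simp)
    have hk : PySem.Chars.rfindFrom edi.toList ['~', 'S', 'T', '*'] 0 (some ((pvOfs (q :: t) : Nat) : Int)) = -1 := by
      rw [pv_rfindFrom_eval _ _ _ hNle, htake,
        show (['~', 'S', 'T', '*'] : List Char) = '~' :: ['S', 'T', '*'] from rfl,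
        pv_rfind_marker (by decide) (by decide) t q hq (fun x hx => htail x (by simp [hx])),
        pv_lastOff_none t (fun x hx => hnoST x (by simp [hx]))]
      simp
    have hswST : PySem.Chars.startswith edi.toList ['S', 'T', '*'] = false := by
      show List.isPrefixOf ['S', 'T', '*'] edi.toList = false
      rw [hs, pv_prefix_join _ (by decide) hq]
      exact eq_false_of_ne_true (hnoST q (by simp))
    have hne2 : ¬ ((q.length : Int) + ((pvOfs t : Nat) : Int) = -1) := by omega
    have hseOff2 : (q.length : Int) + ((pvOfs t : Nat) : Int) + 1 = ((pvOfs (q :: t) : Nat) : Int) := by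
      rw [pv_ofs_cons]; push_cast; ring
    unfold recount_se_and_fix_alt
    simp [hsw, hfind, hne2, hseOff2, hk, hswST]

lemma pv_B_SE_ST {edi : String} {a : List (List Char)} {stp : List Char} {b : List (List Char)}
    {p : List Char} {suf : List (List Char)}
    (hs : edi.toList = PySem.Chars.join ['~'] ((a ++ stp :: b) ++ p :: suf))
    (hfree : ∀ x ∈ (a ++ stp :: b) ++ p :: suf, '~' ∉ x)
    (hpre : ∀ x ∈ a ++ stp :: b, ¬ List.isPrefixOf ['S', 'E', '*'] x)
    (hp : List.isPrefixOf ['S', 'E', '*'] p = true)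
    (hstp : List.isPrefixOf ['S', 'T', '*'] stp = true)
    (hb : ∀ x ∈ b, ¬ List.isPrefixOf ['S', 'T', '*'] x) :
    recount_se_and_fix_alt edi
      = String.ofList (PySem.Chars.join ['~']
          ((a ++ stp :: b) ++ pvNewSeg p ((b.length : Int) + 2) :: suf)) := by
  have hp' : '~' ∉ p := hfree p (by simp)
  obtain ⟨sq, hsq⟩ := pv_SE_shape hp
  -- head/tail view of pre
  have hpre_ne : a ++ stp :: b ≠ [] := by simp
  -- seOff evaluates to pvOfs (a ++ stp :: b)
  cases a with
  | nil =>
    -- pre = stp :: b : the ST segment is the head; rfind misses, the startswith fallback hits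
    simp only [List.nil_append] at hs hpre ⊢
    have hq : '~' ∉ stp := hfree stp (by simp)
    rw [show (stp :: b) ++ p :: suf = stp :: (b ++ p :: suf) from rfl] at hs
    have htail : ∀ x ∈ b ++ p :: suf, '~' ∉ x := by
      intro x hx; exact hfree x (by simpa using Or.inr hx)
    have hsw : PySem.Chars.startswith edi.toList ['S', 'E', '*'] = false := by
      show List.isPrefixOf ['S', 'E', '*'] edi.toList = false
      rw [hs, pv_prefix_join _ (by decide) hq]
      exact eq_false_of_ne_true (hpre stp (by simp))
    have hfo : pvFirstOff ['S', 'E', '*'] (b ++ p :: suf) = some (pvOfs b) :=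
      pv_firstOff_decomp b p suf (fun x hx => hpre x (by simp [hx])) hp
    have hfind : PySem.Chars.find edi.toList ['~', 'S', 'E', '*'] = ((stp.length + pvOfs b : Nat) : Int) := by
      rw [hs, show (['~', 'S', 'E', '*'] : List Char) = '~' :: ['S', 'E', '*'] from rfl,
        pv_find_marker (by decide) _ stp hq htail, hfo]
    have hne2 : ¬ ((stp.length : Int) + ((pvOfs b : Nat) : Int) = -1) := by omega
    have hseOff2 : (stp.length : Int) + ((pvOfs b : Nat) : Int) + 1 = ((pvOfs (stp :: b) : Nat) : Int) := by
      rw [pv_ofs_cons]; push_cast; ring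
    have hsE : edi.toList = PySem.Chars.join ['~'] ((stp :: b) ++ p :: suf) := hs
    have hlen : edi.toList.length = pvOfs (stp :: b) + (PySem.Chars.join ['~'] (p :: suf)).length := by
      rw [hsE]; exact pv_len_join (stp :: b) (p :: suf) (by simp)
    have hNle : pvOfs (stp :: b) ≤ edi.toList.length := by omega
    have htakeN : edi.toList.take (pvOfs (stp :: b)) = PySem.Chars.join ['~'] (stp :: b) ++ ['~'] := by
      rw [hsE]; exact pv_take_join (stp :: b) (p :: suf) (by simp) (by simp)
    have hk : PySem.Chars.rfindFrom edi.toList ['~', 'S', 'T', '*'] 0 (some ((pvOfs (stp :: b) : Nat) : Int)) = -1 := by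
      rw [pv_rfindFrom_eval _ _ _ hNle, htakeN,
        show (['~', 'S', 'T', '*'] : List Char) = '~' :: ['S', 'T', '*'] from rfl,
        pv_rfind_marker (by decide) (by decide) b stp hq (fun x hx => htail x (by simp [hx])),
        pv_lastOff_none b hb]
      simp
    have hswST : PySem.Chars.startswith edi.toList ['S', 'T', '*'] = true := by
      show List.isPrefixOf ['S', 'T', '*'] edi.toList = true
      rw [hs, pv_prefix_join _ (by decide) hq]
      exact hstp
    -- count slice: from offset 0 to pvOfs (stp :: b)
    have hcount : (PySem.Chars.join ['~'] (stp :: b) ++ ['~']).count '~' = b.length + 1 := by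
      have := pv_count_join (sep := '~') (stp :: b) (by simp) (by
        intro x hx; rcases List.mem_cons.mp hx with h | h
        · subst h; exact hq
        · exact htail x (by simp [h]))
      simpa using this
    -- endOff and the SE-segment slice / the final stitching, by cases on suf
    cases suf with
    | nil =>
      have hdropN : edi.toList.drop (pvOfs (stp :: b)) = p := by
        rw [hsE, pv_drop_join (stp :: b) [p] (by simp)]
        simp [PySem.Chars.join, List.intercalate]
      have hfindFrom : PySem.Chars.findFrom edi.toList ['~'] ((pvOfs (stp :: b) : Nat) : Int) none = -1 := by
        rw [PySem.Chars.findFrom_natCast _ _ _ hNle, hdropN,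
          show (['~'] : List Char) = '~' :: [] from rfl, pv_find_free [] hp']
        simp
      have hlenp : edi.toList.length = pvOfs (stp :: b) + p.length := by
        rw [hlen]; simp [PySem.Chars.join, List.intercalate]
      have hrhs : ∀ x : List Char, PySem.Chars.join ['~'] (stp :: (b ++ [x]))
          = PySem.Chars.join ['~'] (stp :: b) ++ '~' :: x := by
        intro x
        rw [show stp :: (b ++ [x]) = (stp :: b) ++ [x] by simp,
          pv_join_append '~' (stp :: b) [x] (by simp) (by simp)]
        simp [PySem.Chars.join, List.intercalate]
      have hL : edi.toList.length = edi.length := by simp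
      have hcountC : PySem.Chars.count (PySem.Chars.join ['~'] (stp :: b) ++ ['~']) ['~'] = b.length + 1 := by
        rw [pv_count_single]; exact hcount
      have hslice2' : PySem.List.slice edi.toList (some ((pvOfs (stp :: b) : Nat) : Int)) (some ((edi.length : Nat) : Int)) = p := by
        rw [PySem.List.slice_natCast, hdropN,
          show edi.length - pvOfs (stp :: b) = p.length by omega]
        simp
      have hdropEnd' : List.drop edi.length edi.toList = ([] : List Char) := by
        rw [← hL]; exact List.drop_length
      have hc3 : (b.length : Int) + 1 + 1 = (b.length : Int) + 2 := by ring
      unfold recount_se_and_fix_alt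
      simp [hsw, hfind, hne2, hseOff2, hk, hswST, hfindFrom, htakeN, hcountC, hc3,
        hslice2', hdropEnd', hrhs, pvNewSeg]
    | cons s1 srest =>
      have hsuf_ne : (s1 :: srest : List (List Char)) ≠ [] := by simp
      have hdropN : edi.toList.drop (pvOfs (stp :: b)) = p ++ '~' :: PySem.Chars.join ['~'] (s1 :: srest) := by
        rw [hsE, pv_drop_join (stp :: b) (p :: s1 :: srest) (by simp),
          pv_join_cons '~' p (s1 :: srest) hsuf_ne]
      have hfindp : PySem.Chars.find (p ++ '~' :: PySem.Chars.join ['~'] (s1 :: srest)) ['~'] = (p.length : Int) := by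
        rw [show (['~'] : List Char) = '~' :: [] from rfl]
        exact pv_find_single _ hp'
      have hfindFrom : PySem.Chars.findFrom edi.toList ['~'] ((pvOfs (stp :: b) : Nat) : Int) none
          = ((pvOfs (stp :: b) : Nat) : Int) + (p.length : Int) := by
        rw [PySem.Chars.findFrom_natCast _ _ _ hNle, hdropN, hfindp]
        rw [if_neg (by omega : ¬ ((p.length : Int) = -1))]
      have hEne : ¬ (((pvOfs (stp :: b) : Nat) : Int) + (p.length : Int) = -1) := by omega
      have hslice2 : PySem.List.slice edi.toList (some ((pvOfs (stp :: b) : Nat) : Int))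
          (some (((pvOfs (stp :: b) : Nat) : Int) + (p.length : Int))) = p := by
        rw [PySem.List.slice_natCast_add, hdropN]
        exact List.take_left
      have hdropE : PySem.List.slice edi.toList (some (((pvOfs (stp :: b) : Nat) : Int) + (p.length : Int))) none
          = '~' :: PySem.Chars.join ['~'] (s1 :: srest) := by
        rw [show ((pvOfs (stp :: b) : Nat) : Int) + (p.length : Int) = ((pvOfs (stp :: b) + p.length : Nat) : Int) by push_cast; ring,
          PySem.List.slice_from_natCast,
          ← List.drop_drop, hdropN]
        exact List.drop_left
      have hrhs : ∀ x : List Char, PySem.Chars.join ['~'] (stp :: (b ++ x :: s1 :: srest))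
          = PySem.Chars.join ['~'] (stp :: b) ++ '~' :: (x ++ '~' :: PySem.Chars.join ['~'] (s1 :: srest)) := by
        intro x
        rw [show stp :: (b ++ x :: s1 :: srest) = (stp :: b) ++ x :: s1 :: srest by simp,
          pv_join_append '~' (stp :: b) (x :: s1 :: srest) (by simp) (by simp),
          pv_join_cons '~' x (s1 :: srest) hsuf_ne]
      have hcountC : PySem.Chars.count (PySem.Chars.join ['~'] (stp :: b) ++ ['~']) ['~'] = b.length + 1 := by
        rw [pv_count_single]; exact hcount
      have hc3 : (b.length : Int) + 1 + 1 = (b.length : Int) + 2 := by ring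
      unfold recount_se_and_fix_alt
      simp [hsw, hfind, hne2, hseOff2, hk, hswST, hfindFrom, hEne, htakeN, hcountC, hc3,
        hslice2, hdropE, hrhs, pvNewSeg]
  | cons q t' =>
    have hq : '~' ∉ q := hfree q (by simp)
    rw [show ((q :: t') ++ stp :: b) ++ p :: suf = q :: ((t' ++ stp :: b) ++ p :: suf) by simp] at hs
    have htail : ∀ x ∈ (t' ++ stp :: b) ++ p :: suf, '~' ∉ x := by
      intro x hx
      apply hfree x
      simp at hx ⊢
      tauto
    have hsw : PySem.Chars.startswith edi.toList ['S', 'E', '*'] = false := by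
      show List.isPrefixOf ['S', 'E', '*'] edi.toList = false
      rw [hs, pv_prefix_join _ (by decide) hq]
      exact eq_false_of_ne_true (hpre q (by simp))
    have hpreT : ∀ x ∈ t' ++ stp :: b, ¬ List.isPrefixOf ['S', 'E', '*'] x = true := by
      intro x hx
      apply hpre x
      simp at hx ⊢
      tauto
    have hfo : pvFirstOff ['S', 'E', '*'] ((t' ++ stp :: b) ++ p :: suf) = some (pvOfs (t' ++ stp :: b)) :=
      pv_firstOff_decomp (t' ++ stp :: b) p suf hpreT hp
    have hfind : PySem.Chars.find edi.toList ['~', 'S', 'E', '*']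
        = ((q.length + pvOfs (t' ++ stp :: b) : Nat) : Int) := by
      rw [hs, show (['~', 'S', 'E', '*'] : List Char) = '~' :: ['S', 'E', '*'] from rfl,
        pv_find_marker (by decide) _ q hq htail, hfo]
    have hne2 : ¬ ((q.length : Int) + ((pvOfs (t' ++ stp :: b) : Nat) : Int) = -1) := by omega
    have hseOff2 : (q.length : Int) + ((pvOfs (t' ++ stp :: b) : Nat) : Int) + 1
        = ((pvOfs (q :: (t' ++ stp :: b)) : Nat) : Int) := by
      rw [pv_ofs_cons]; push_cast; ring
    have hsE : edi.toList = PySem.Chars.join ['~'] ((q :: (t' ++ stp :: b)) ++ p :: suf) := hs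
    have hlen : edi.toList.length
        = pvOfs (q :: (t' ++ stp :: b)) + (PySem.Chars.join ['~'] (p :: suf)).length := by
      rw [hsE]; exact pv_len_join _ (p :: suf) (by simp)
    have hNle : pvOfs (q :: (t' ++ stp :: b)) ≤ edi.toList.length := by omega
    have htakeN : edi.toList.take (pvOfs (q :: (t' ++ stp :: b)))
        = PySem.Chars.join ['~'] (q :: (t' ++ stp :: b)) ++ ['~'] := by
      rw [hsE]; exact pv_take_join _ (p :: suf) (by simp) (by simp)
    have hk : PySem.Chars.rfindFrom edi.toList ['~', 'S', 'T', '*'] 0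
        (some ((pvOfs (q :: (t' ++ stp :: b)) : Nat) : Int))
        = ((q.length + pvOfs t' : Nat) : Int) := by
      rw [pv_rfindFrom_eval _ _ _ hNle, htakeN,
        show (['~', 'S', 'T', '*'] : List Char) = '~' :: ['S', 'T', '*'] from rfl,
        pv_rfind_marker (by decide) (by decide) (t' ++ stp :: b) q hq
          (fun x hx => htail x (by simp at hx ⊢; tauto)),
        pv_lastOff_decomp t' stp b hstp hb]
      rw [if_neg (by omega : ¬ (((q.length + pvOfs t' : Nat) : Int) = -1))]
    have hkne2 : ¬ ((q.length : Int) + ((pvOfs t' : Nat) : Int) = -1) := by omega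
    have hstOff3 : (q.length : Int) + ((pvOfs t' : Nat) : Int) + 1 = ((pvOfs (q :: t') : Nat) : Int) := by
      rw [pv_ofs_cons]; push_cast; ring
    have hdropA : edi.toList.drop (pvOfs (q :: t'))
        = PySem.Chars.join ['~'] ((stp :: b) ++ p :: suf) := by
      rw [hsE, show (q :: (t' ++ stp :: b)) ++ p :: suf = (q :: t') ++ ((stp :: b) ++ p :: suf) by simp]
      exact pv_drop_join (q :: t') _ (by simp)
    have hofs : pvOfs (q :: (t' ++ stp :: b)) = pvOfs (q :: t') + pvOfs (stp :: b) := by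
      rw [show q :: (t' ++ stp :: b) = (q :: t') ++ (stp :: b) by simp, pv_ofs_append]
    have hslice1 : PySem.List.slice edi.toList (some ((pvOfs (q :: t') : Nat) : Int))
        (some ((pvOfs (q :: (t' ++ stp :: b)) : Nat) : Int))
        = PySem.Chars.join ['~'] (stp :: b) ++ ['~'] := by
      rw [PySem.List.slice_natCast, hdropA,
        show pvOfs (q :: (t' ++ stp :: b)) - pvOfs (q :: t') = pvOfs (stp :: b) by omega]
      exact pv_take_join (stp :: b) (p :: suf) (by simp) (by simp)
    have hstpf : '~' ∉ stp := htail stp (by simp)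
    have hcountC : PySem.Chars.count (PySem.Chars.join ['~'] (stp :: b) ++ ['~']) ['~'] = b.length + 1 := by
      rw [pv_count_single]
      have := pv_count_join (sep := '~') (stp :: b) (by simp) (by
        intro x hx
        rcases List.mem_cons.mp hx with h | h
        · subst h; exact hstpf
        · exact htail x (by simp [h]))
      simpa using this
    have hc3 : (b.length : Int) + 1 + 1 = (b.length : Int) + 2 := by ring
    cases suf with
    | nil =>
      have hdropN : edi.toList.drop (pvOfs (q :: (t' ++ stp :: b))) = p := by
        rw [hsE, pv_drop_join _ [p] (by simp)]
        simp [PySem.Chars.join, List.intercalate]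
      have hfindFrom : PySem.Chars.findFrom edi.toList ['~'] ((pvOfs (q :: (t' ++ stp :: b)) : Nat) : Int) none = -1 := by
        rw [PySem.Chars.findFrom_natCast _ _ _ hNle, hdropN,
          show (['~'] : List Char) = '~' :: [] from rfl, pv_find_free [] hp']
        simp
      have hlenp : edi.toList.length = pvOfs (q :: (t' ++ stp :: b)) + p.length := by
        rw [hlen]; simp [PySem.Chars.join, List.intercalate]
      have hL : edi.toList.length = edi.length := by simp
      have hslice2' : PySem.List.slice edi.toList (some ((pvOfs (q :: (t' ++ stp :: b)) : Nat) : Int))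
          (some ((edi.length : Nat) : Int)) = p := by
        rw [PySem.List.slice_natCast, hdropN,
          show edi.length - pvOfs (q :: (t' ++ stp :: b)) = p.length by omega]
        simp
      have hdropEnd' : List.drop edi.length edi.toList = ([] : List Char) := by
        rw [← hL]; exact List.drop_length
      have hrhs : ∀ x : List Char, PySem.Chars.join ['~'] (q :: (t' ++ stp :: (b ++ [x])))
          = PySem.Chars.join ['~'] (q :: (t' ++ stp :: b)) ++ '~' :: x := by
        intro x
        rw [show q :: (t' ++ stp :: (b ++ [x])) = (q :: (t' ++ stp :: b)) ++ [x] by simp,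
          pv_join_append '~' _ [x] (by simp) (by simp)]
        simp [PySem.Chars.join, List.intercalate]
      unfold recount_se_and_fix_alt
      simp [hsw, hfind, hne2, hseOff2, hk, hkne2, hstOff3, hfindFrom, htakeN,
        hcountC, hc3, hslice1, hslice2', hdropEnd', hrhs, pvNewSeg]
    | cons s1 srest =>
      have hsuf_ne : (s1 :: srest : List (List Char)) ≠ [] := by simp
      have hdropN : edi.toList.drop (pvOfs (q :: (t' ++ stp :: b)))
          = p ++ '~' :: PySem.Chars.join ['~'] (s1 :: srest) := by
        rw [hsE, pv_drop_join _ (p :: s1 :: srest) (by simp),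
          pv_join_cons '~' p (s1 :: srest) hsuf_ne]
      have hfindp : PySem.Chars.find (p ++ '~' :: PySem.Chars.join ['~'] (s1 :: srest)) ['~'] = (p.length : Int) := by
        rw [show (['~'] : List Char) = '~' :: [] from rfl]
        exact pv_find_single _ hp'
      have hfindFrom : PySem.Chars.findFrom edi.toList ['~'] ((pvOfs (q :: (t' ++ stp :: b)) : Nat) : Int) none
          = ((pvOfs (q :: (t' ++ stp :: b)) : Nat) : Int) + (p.length : Int) := by
        rw [PySem.Chars.findFrom_natCast _ _ _ hNle, hdropN, hfindp]
        rw [if_neg (by omega : ¬ ((p.length : Int) = -1))]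
      have hEne : ¬ (((pvOfs (q :: (t' ++ stp :: b)) : Nat) : Int) + (p.length : Int) = -1) := by omega
      have hslice2 : PySem.List.slice edi.toList (some ((pvOfs (q :: (t' ++ stp :: b)) : Nat) : Int))
          (some (((pvOfs (q :: (t' ++ stp :: b)) : Nat) : Int) + (p.length : Int))) = p := by
        rw [PySem.List.slice_natCast_add, hdropN]
        exact List.take_left
      have hdropE : PySem.List.slice edi.toList
          (some (((pvOfs (q :: (t' ++ stp :: b)) : Nat) : Int) + (p.length : Int))) none
          = '~' :: PySem.Chars.join ['~'] (s1 :: srest) := by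
        rw [show ((pvOfs (q :: (t' ++ stp :: b)) : Nat) : Int) + (p.length : Int)
              = ((pvOfs (q :: (t' ++ stp :: b)) + p.length : Nat) : Int) by push_cast; ring,
          PySem.List.slice_from_natCast, ← List.drop_drop, hdropN]
        exact List.drop_left
      have hrhs : ∀ x : List Char, PySem.Chars.join ['~'] (q :: (t' ++ stp :: (b ++ x :: s1 :: srest)))
          = PySem.Chars.join ['~'] (q :: (t' ++ stp :: b)) ++ '~' :: (x ++ '~' :: PySem.Chars.join ['~'] (s1 :: srest)) := by
        intro x
        rw [show q :: (t' ++ stp :: (b ++ x :: s1 :: srest)) = (q :: (t' ++ stp :: b)) ++ x :: s1 :: srest by simp,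
          pv_join_append '~' _ (x :: s1 :: srest) (by simp) (by simp),
          pv_join_cons '~' x (s1 :: srest) hsuf_ne]
      unfold recount_se_and_fix_alt
      simp [hsw, hfind, hne2, hseOff2, hk, hkne2, hstOff3, hfindFrom, hEne,
        htakeN, hcountC, hc3, hslice1, hslice2, hdropE, hrhs, pvNewSeg]

-- ----- A-side terminal evaluation -----

lemma pv_A_SE {edi : String} {a : List (List Char)} {stp : List Char} {b : List (List Char)}
    {p : List Char} {suf : List (List Char)}
    (hp : List.isPrefixOf ['S', 'E', '*'] p = true) :
    pvPostA edi ((a ++ stp :: b) ++ p :: suf)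
        (some ((a.length : Nat) : Int), some (((a ++ stp :: b).length : Nat) : Int))
      = String.ofList (PySem.Chars.join ['~']
          ((a ++ stp :: b) ++ pvNewSeg p ((b.length : Int) + 2) :: suf)) := by
  obtain ⟨sq, rfl⟩ := pv_SE_shape hp
  obtain ⟨f1, rest, hq⟩ : ∃ f1 rest, PySem.Chars.splitOn sq ['*'] = f1 :: rest := by
    cases h : PySem.Chars.splitOn sq ['*'] with
    | nil =>
      rw [pv_splitOn_eq] at h
      exact absurd h (pvSplit_ne_nil '*' sq)
    | cons f1 rest => exact ⟨f1, rest, rfl⟩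
  have hcnt : (((a ++ stp :: b).length : Nat) : Int) - ((a.length : Nat) : Int) + 1
      = (b.length : Int) + 2 := by
    simp only [List.length_append, List.length_cons]
    push_cast
    ring
  simp only [pvPostA]
  rw [PySem.List.pyGetD_natCast, List.getD_append_right _ _ _ _ (le_refl _)]
  simp only [Nat.sub_self, List.getD_cons_zero, pv_splitOn_SEstar, hq]
  rw [if_pos (by simp)]
  rw [show (((((a ++ stp :: b).length : Nat) : Int)).toNat) = (a ++ stp :: b).length from Int.toNat_natCast _,
    List.set_append_right _ _ (le_refl _)]
  simp only [Nat.sub_self, List.set_cons_zero, hcnt]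
  simp [pvNewSeg, pv_splitOn_SEstar, hq]

-- ----- the main loop correspondence -----

lemma pv_main {edi : String} : ∀ (suf pre : List (List Char)) (stA : Option Int),
    edi.toList = PySem.Chars.join ['~'] (pre ++ suf) →
    pre ++ suf ≠ [] →
    (∀ x ∈ pre ++ suf, '~' ∉ x) →
    (∀ x ∈ pre, ¬ List.isPrefixOf ['S', 'E', '*'] x) →
    ((stA = none ∧ ∀ x ∈ pre, ¬ List.isPrefixOf ['S', 'T', '*'] x) ∨
      (∃ a stp b, pre = a ++ stp :: b ∧ List.isPrefixOf ['S', 'T', '*'] stp = true ∧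
        (∀ x ∈ b, ¬ List.isPrefixOf ['S', 'T', '*'] x) ∧ stA = some ((a.length : Nat) : Int))) →
    pvPostA edi (pre ++ suf) (pvFindA (PySem.List.enumerate suf ((pre.length : Nat) : Int)) stA)
      = recount_se_and_fix_alt edi := by
  intro suf
  induction suf with
  | nil =>
    intro pre stA hs hne hfree hpreSE _
    rw [show PySem.List.enumerate ([] : List (List Char)) ((pre.length : Nat) : Int) = [] from rfl,
      show pvFindA [] stA = (stA, none) from rfl,
      show pvPostA edi (pre ++ []) (stA, none) = edi by cases stA <;> rfl]
    exact (pv_B_noSE (by simpa using hs) (by simpa using hne) (by simpa using hfree)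
      (by simpa using hpreSE)).symm
  | cons p suf' ih =>
    intro pre stA hs hne hfree hpreSE hstinv
    rw [PySem.List.enumerate_cons]
    by_cases hSE : PySem.Chars.startswith p ['S', 'E', '*'] = true
    · -- the loop stops here: index pre.length is the SE segment
      have hSEp : List.isPrefixOf ['S', 'E', '*'] p = true := hSE
      have hSTp : List.isPrefixOf ['S', 'T', '*'] p = false := pv_not_ST_of_SE hSEp
      rw [show pvFindA ((((pre.length : Nat) : Int), p)
              :: PySem.List.enumerate suf' (((pre.length : Nat) : Int) + 1)) stA
            = (stA, some ((pre.length : Nat) : Int)) by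
          simp only [pvFindA]
          rw [show PySem.Chars.startswith p ['S', 'T', '*'] = false from hSTp]
          simp [hSE]]
      rcases hstinv with ⟨rfl, hnoST⟩ | ⟨a, stp, b, rfl, hstp, hb, rfl⟩
      · rw [show pvPostA edi (pre ++ p :: suf') (none, some ((pre.length : Nat) : Int)) = edi from rfl]
        exact (pv_B_SE_noST hs hfree hpreSE hSEp hnoST).symm
      · rw [show (((a ++ stp :: b).length : Nat) : Int) = (((a ++ stp :: b).length : Nat) : Int) from rfl,
          pv_A_SE hSEp, pv_B_SE_ST hs hfree hpreSE hSEp hstp hb]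
    · -- not the SE segment: one more loop step
      rw [show pvFindA ((((pre.length : Nat) : Int), p)
              :: PySem.List.enumerate suf' (((pre.length : Nat) : Int) + 1)) stA
            = pvFindA (PySem.List.enumerate suf' (((pre.length : Nat) : Int) + 1))
                (if PySem.Chars.startswith p ['S', 'T', '*'] then some ((pre.length : Nat) : Int) else stA) by
          simp [pvFindA, hSE]]
      have harr : pre ++ p :: suf' = (pre ++ [p]) ++ suf' := by simp
      have hlen1 : ((pre.length : Nat) : Int) + 1 = (((pre ++ [p]).length : Nat) : Int) := by
        push_cast [List.length_append]
        simp
      rw [harr, hlen1]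
      apply ih (pre ++ [p])
      · rw [← harr]; exact hs
      · simp
      · rw [← harr]; exact hfree
      · intro x hx
        rcases List.mem_append.mp hx with h | h
        · exact hpreSE x h
        · rw [List.mem_singleton.mp h]
          exact fun hc => hSE hc
      · by_cases hST : PySem.Chars.startswith p ['S', 'T', '*'] = true
        · right
          exact ⟨pre, p, [], by simp, hST, by simp, by simp [hST]⟩
        · rcases hstinv with ⟨rfl, hnoST⟩ | ⟨a, stp, b, heq, hstp, hb, rfl⟩
          · left
            refine ⟨by simp [hST], ?_⟩
            intro x hx
            rcases List.mem_append.mp hx with h | h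
            · exact hnoST x h
            · rw [List.mem_singleton.mp h]
              exact fun hc => hST hc
          · right
            refine ⟨a, stp, b ++ [p], by rw [heq]; simp, hstp, ?_, by simp [hST]⟩
            intro x hx
            rcases List.mem_append.mp hx with h | h
            · exact hb x h
            · rw [List.mem_singleton.mp h]
              exact fun hc => hST hc


-- ===== VERDICT (by name: the statement is the Claim_ definition above) =====
theorem recount_se_and_fix_spec : Claim_equal_recount_se_and_fix := by
  intro edi _
  unfold Spec_recount_se_and_fix recount_se_and_fix
  rw [pv_splitOn_eq]
  have h := pv_main (edi := edi) (pvSplit '~' edi.toList) [] none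
    (by simpa using (pv_join_split '~' edi.toList).symm)
    (by simpa using pvSplit_ne_nil '~' edi.toList)
    (by intro x hx; exact pv_free (by simpa using hx))
    (by intro x hx; simp at hx)
    (Or.inl ⟨rfl, by intro x hx; simp at hx⟩)
  simpa using h
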